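-- pv_equiv track=rewrite | github.com/trabajosproyecta/cubicator3000 | cubicator/main.py | string_results
-- ===== SOURCE A (Python) =====
-- def string_results(nombre, optimum, cuts, precio):
--     totalcortes = [0 for _ in cuts]
--     s = "\t" + "-" * 50 + "\n"
--     s += "\t -- " + nombre + " --\n\n\t\t"
--     for corte in cuts:
--         s += str(corte).ljust(6) + "\t"
--     s += "\n"
--     for cantidad, patron in optimum:
--         s += "\t" + str(cantidad) + "\t"
--         for i, ncortes in enumerate(patron):
--             totalcortes[i] += ncortes * cantidad
--             if ncortes == 0:
--                 ncortes = "-"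
--             s += str(ncortes).ljust(6) + "\t"
--         s += "\t" + str(sum([a * b for a, b in zip(patron, cuts)])) + "\n"
--     npalos = sum([a for a, b in optimum])
--     s += "\t\t"
--     for corte in totalcortes:
--         s += str(corte).ljust(6) + "\t"
--     s += "\n\n\tTotal: " + str(npalos)
--     s += "\t\tPrecio: $" + tointstr(npalos * precio)
--     return s
--
-- def tointstr(numero):
--     nums = str(int(numero))
--     largo = len(nums)
--     for i, _ in enumerate(nums):
--         if i % 3 == 0 and i != 0:
--             nums = nums[:largo - i] + "." + nums[largo - i:]
--     return nums
-- ===== SOURCE B (Python) =====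
-- def _group(n):
--     # split str(n) into chunks of 3 from the right, join with "."
--     s = str(int(n))
--     chunks = []
--     while len(s) > 3:
--         chunks = [s[-3:]] + chunks
--         s = s[:-3]
--     return ".".join([s] + chunks)
--
--
-- def string_results(nombre, optimum, cuts, precio):
--     # aggregation pass
--     totalcortes = [0] * len(cuts)
--     for cantidad, patron in optimum:
--         totalcortes[:len(patron)] = [t + x * cantidad
--                                      for t, x in zip(totalcortes, patron)]
--     npalos = sum(c for c, _ in optimum)
--     # rendering pass
--     cell = lambda x: str(x).ljust(6) + "\t"
--     header = ("\t" + "-" * 50 + "\n\t -- " + nombre + " --\n\n\t\t"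
--               + "".join(cell(c) for c in cuts) + "\n")
--     rows = "".join(
--         "\t" + str(c) + "\t"
--         + "".join(cell("-" if x == 0 else x) for x in p)
--         + "\t" + str(sum(a * b for a, b in zip(p, cuts))) + "\n"
--         for c, p in optimum)
--     totals = "\t\t" + "".join(cell(t) for t in totalcortes) + "\n\n"
--     footer = "\tTotal: " + str(npalos) + "\t\tPrecio: $" + _group(npalos * precio)
--     return header + rows + totals + footer
-- ===== Notes on version B (the rewrite author's own statement) =====
-- stated objective: alternative
-- what changed: B separates a pure aggregation pass (totalcortes built by zip-based whole-row slice updates, npalos by sum) from a rendering pass that assembles header/rows/totals/footer with joins over maps, replacing A's single interleaved loop that mutates totalcortes element-by-element while growing the string with +=; the thousands-grouping helper is rewritten as right-to-left 3-chunking joined with dots instead of in-place dotted insertions over a scanned index.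
import Mathlib
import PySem

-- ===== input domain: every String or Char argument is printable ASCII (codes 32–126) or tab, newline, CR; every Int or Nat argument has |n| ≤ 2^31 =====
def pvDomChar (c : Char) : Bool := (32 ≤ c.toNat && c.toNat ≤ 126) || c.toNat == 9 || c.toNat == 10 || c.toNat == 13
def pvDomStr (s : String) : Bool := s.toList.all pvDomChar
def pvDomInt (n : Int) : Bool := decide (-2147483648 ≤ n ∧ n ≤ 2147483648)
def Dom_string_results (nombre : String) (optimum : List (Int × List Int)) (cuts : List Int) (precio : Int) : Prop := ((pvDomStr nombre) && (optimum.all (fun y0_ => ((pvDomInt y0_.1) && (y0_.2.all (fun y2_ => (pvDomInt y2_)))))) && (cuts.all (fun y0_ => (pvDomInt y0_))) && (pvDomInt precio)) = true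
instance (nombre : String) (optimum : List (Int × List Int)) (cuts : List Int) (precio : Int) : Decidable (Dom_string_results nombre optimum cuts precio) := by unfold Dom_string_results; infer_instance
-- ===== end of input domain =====

-- B separates aggregation (column sums, npalos) from rendering (map/flatten joins) instead of
-- A's single interleaved += loop; the grouping helper chunks from the right instead of inserting
-- dots over a scanned index. Objective: alternative decomposition (same asymptotic cost).

-- ===== PORT A =====

-- str(x).ljust(6): pad on the right with spaces to width 6 (exact: Nat subtraction truncates at 0,
-- as Python pads nothing when the string is already long enough)
def pvLjust6 (cs : List Char) : List Char := cs ++ List.replicate (6 - cs.length) ' '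

-- port of tointstr: nums = str(int(numero)); for i,_ in enumerate(nums): if i%3==0 and i!=0:
--   nums = nums[:largo-i] + "." + nums[largo-i:]   (largo fixed = original length)
def pvTointstr (numero : Int) : List Char :=
  let nums := PySem.Int.toChars numero
  let largo := nums.length
  (List.range largo).foldl
    (fun nums i =>
      if i % 3 == 0 && i != 0 then
        nums.take (largo - i) ++ '.' :: nums.drop (largo - i)
      else nums)
    nums

def string_results (nombre : String) (optimum : List (Int × List Int)) (cuts : List Int) (precio : Int) : String :=
  let totalcortes : List Int := cuts.map (fun _ => 0)
  let s : List Char := '\t' :: List.replicate 50 '-' ++ ['\n']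
  let s := s ++ "\t -- ".toList ++ nombre.toList ++ " --\n\n\t\t".toList
  let s := cuts.foldl (fun s corte => s ++ pvLjust6 (PySem.Int.toChars corte) ++ ['\t']) s
  let s := s ++ ['\n']
  let st := optimum.foldl
    (fun (st : List Char × List Int) cp =>
      let cantidad := cp.1
      let patron := cp.2
      let s := st.1 ++ ['\t'] ++ PySem.Int.toChars cantidad ++ ['\t']
      let st2 := (PySem.List.enumerate patron 0).foldl
        (fun (st2 : List Char × List Int) inx =>
          let i := inx.1
          let ncortes := inx.2
          -- totalcortes[i] += ncortes * cantidad (in range on every input admitted by Pre_)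
          let tc := st2.2.set i.toNat (st2.2.getD i.toNat 0 + ncortes * cantidad)
          let cellcs := if ncortes == 0 then ['-'] else PySem.Int.toChars ncortes
          (st2.1 ++ pvLjust6 cellcs ++ ['\t'], tc))
        (s, st.2)
      (st2.1 ++ ['\t'] ++ PySem.Int.toChars ((List.zipWith (· * ·) patron cuts).sum) ++ ['\n'], st2.2))
    (s, totalcortes)
  let npalos := (optimum.map (·.1)).sum
  let s := st.1 ++ "\t\t".toList
  let s := st.2.foldl (fun s corte => s ++ pvLjust6 (PySem.Int.toChars corte) ++ ['\t']) s
  let s := s ++ "\n\n\tTotal: ".toList ++ PySem.Int.toChars npalos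
  let s := s ++ "\t\tPrecio: $".toList ++ pvTointstr (npalos * precio)
  String.ofList s

-- ===== PORT B =====

-- while len(s) > 3: chunks = [s[-3:]] + chunks; s = s[:-3]  — then [s] + chunks
def pvGroupLoop (s : List Char) (chunks : List (List Char)) : List (List Char) :=
  if 3 < s.length then
    pvGroupLoop (s.take (s.length - 3)) (s.drop (s.length - 3) :: chunks)
  else s :: chunks
termination_by s.length
decreasing_by simp; omega

-- _group: right-to-left 3-chunking of str(int(n)), joined with "."
def pvGroup (n : Int) : List Char :=
  PySem.Chars.join ['.'] (pvGroupLoop (PySem.Int.toChars n) [])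

-- cell = str(x).ljust(6) + "\t"
def pvCell (cs : List Char) : List Char := cs ++ List.replicate (6 - cs.length) ' ' ++ ['\t']

def string_results_alt (nombre : String) (optimum : List (Int × List Int)) (cuts : List Int) (precio : Int) : String :=
  -- aggregation pass; the slice assignment totalcortes[:len(patron)] = [...] is ported exactly:
  -- the zip truncates at the shorter list and the untouched tail is tc.drop (len patron)
  let totalcortes : List Int := optimum.foldl
    (fun tc cp => List.zipWith (fun t x => t + x * cp.1) tc cp.2 ++ tc.drop cp.2.length)
    (PySem.List.pyRepeat [0] (PySem.List.len cuts))
  let npalos : Int := (optimum.map (·.1)).sum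
  -- rendering pass
  let header := '\t' :: List.replicate 50 '-' ++ "\n\t -- ".toList ++ nombre.toList
    ++ " --\n\n\t\t".toList ++ (cuts.map (fun c => pvCell (PySem.Int.toChars c))).flatten ++ ['\n']
  let rows := (optimum.map (fun cp =>
      '\t' :: PySem.Int.toChars cp.1 ++ ['\t']
      ++ (cp.2.map (fun x => pvCell (if x == 0 then ['-'] else PySem.Int.toChars x))).flatten
      ++ '\t' :: PySem.Int.toChars ((List.zipWith (· * ·) cp.2 cuts).sum) ++ ['\n'])).flatten
  let totals := "\t\t".toList ++ (totalcortes.map (fun t => pvCell (PySem.Int.toChars t))).flatten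
    ++ "\n\n".toList
  let footer := "\tTotal: ".toList ++ PySem.Int.toChars npalos ++ "\t\tPrecio: $".toList
    ++ pvGroup (npalos * precio)
  String.ofList (header ++ rows ++ totals ++ footer)

-- ===== PRECONDITION & SPEC =====
-- A raises IndexError (totalcortes[i]) as soon as some patron is longer than cuts; Pre_ excludes
-- exactly those inputs.
def Pre_string_results (nombre : String) (optimum : List (Int × List Int)) (cuts : List Int) (precio : Int) : Prop :=
  ∀ cp ∈ optimum, cp.2.length ≤ cuts.length
instance (nombre : String) (optimum : List (Int × List Int)) (cuts : List Int) (precio : Int) : Decidable (Pre_string_results nombre optimum cuts precio) := by unfold Pre_string_results; infer_instance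

def pvWitness_string_results : String × (List (Int × List Int)) × List Int × Int :=
  ("barra", [(2, [1, 0]), (1, [0, 3])], [120, 45], 7)

def Spec_string_results (nombre : String) (optimum : List (Int × List Int)) (cuts : List Int) (precio : Int) (out : String) : Prop := out = string_results_alt nombre optimum cuts precio
instance (nombre : String) (optimum : List (Int × List Int)) (cuts : List Int) (precio : Int) (out : String) : Decidable (Spec_string_results nombre optimum cuts precio out) := by unfold Spec_string_results; infer_instance

-- ===== CLAIM (what is proved, stated in full; the proofs are below) =====
def Claim_equal_string_results : Prop := ∀ (nombre : String) (optimum : List (Int × List Int)) (cuts : List Int) (precio : Int), Dom_string_results nombre optimum cuts precio → Pre_string_results nombre optimum cuts precio → Spec_string_results nombre optimum cuts precio (string_results nombre optimum cuts precio)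


-- ===== LEMMAS AND PROOFS =====

-- ---- the grouping helpers: pvTointstr = pvGroup ----

theorem pvGroupLoop_le {s : List Char} (h : ¬ 3 < s.length) (acc : List (List Char)) :
    pvGroupLoop s acc = s :: acc := by
  rw [pvGroupLoop.eq_def]; simp [h]

theorem pvGroupLoop_gt {s : List Char} (h : 3 < s.length) (acc : List (List Char)) :
    pvGroupLoop s acc = pvGroupLoop (s.take (s.length - 3)) (s.drop (s.length - 3) :: acc) := by
  conv_lhs => rw [pvGroupLoop.eq_def]
  simp [h]

theorem pvGroupLoop_acc (n : Nat) : ∀ (s : List Char), s.length ≤ n → ∀ (acc : List (List Char)),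
    pvGroupLoop s acc = pvGroupLoop s [] ++ acc := by
  induction n with
  | zero =>
    intro s hs acc
    have h : ¬ 3 < s.length := by omega
    rw [pvGroupLoop_le h, pvGroupLoop_le h]; simp
  | succ n ih =>
    intro s hs acc
    by_cases h3 : 3 < s.length
    · rw [pvGroupLoop_gt h3, pvGroupLoop_gt h3,
        ih _ (by simp; omega), ih _ (by simp; omega) ([_])]
      simp
    · rw [pvGroupLoop_le h3, pvGroupLoop_le h3]; simp

theorem pvGroupLoop_ne_nil (n : Nat) : ∀ (s : List Char), s.length ≤ n → ∀ acc,
    pvGroupLoop s acc ≠ [] := by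
  induction n with
  | zero =>
    intro s hs acc
    rw [pvGroupLoop_le (by omega)]
    simp
  | succ n ih =>
    intro s hs acc
    by_cases h3 : 3 < s.length
    · rw [pvGroupLoop_gt h3]
      exact ih _ (by simp; omega) _
    · rw [pvGroupLoop_le h3]; simp

theorem pv_join_append (sep d : List Char) (xs : List (List Char)) (h : xs ≠ []) :
    PySem.Chars.join sep (xs ++ [d]) = PySem.Chars.join sep xs ++ sep ++ d := by
  induction xs with
  | nil => simp at h
  | cons a t ih =>
    cases t with
    | nil => simp [PySem.Chars.join_cons_cons, PySem.Chars.join_singleton]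
    | cons b t2 =>
      simp only [List.cons_append]
      rw [PySem.Chars.join_cons_cons sep a b (t2 ++ [d])]
      rw [show b :: (t2 ++ [d]) = (b :: t2) ++ [d] from rfl, ih (by simp),
        PySem.Chars.join_cons_cons sep a b t2]
      simp [List.append_assoc]

-- one step of A's dotted-insertion loop
def pvInsStep (L : Nat) (s : List Char) (i : Nat) : List Char :=
  if i % 3 == 0 && i != 0 then s.take (L - i) ++ '.' :: s.drop (L - i) else s

theorem pvInsStep_len (L : Nat) (s : List Char) (i : Nat) :
    s.length ≤ (pvInsStep L s i).length := by
  unfold pvInsStep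
  split_ifs with h
  · simp
  · simp

theorem pv_fold_append (L : Nat) (js : List Nat) : ∀ (u rest : List Char),
    (∀ j ∈ js, L - (4 + j) ≤ u.length) →
    js.foldl (fun s j => pvInsStep L s (4 + j)) (u ++ rest)
      = js.foldl (fun s j => pvInsStep L s (4 + j)) u ++ rest := by
  induction js with
  | nil => intro u rest _; simp
  | cons j js ih =>
    intro u rest h
    simp only [List.foldl_cons]
    have hj : L - (4 + j) ≤ u.length := h j (by simp)
    have hstep : pvInsStep L (u ++ rest) (4 + j) = pvInsStep L u (4 + j) ++ rest := by
      unfold pvInsStep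
      split_ifs with hc
      · rw [List.take_append_of_le_length hj, List.drop_append_of_le_length hj]
        simp [List.append_assoc]
      · rfl
    rw [hstep, ih _ rest (fun j' hj' => le_trans (h j' (by simp [hj'])) (pvInsStep_len L u (4+j)))]

theorem pv_ins_eq_group (L : Nat) : ∀ (cs : List Char), cs.length = L →
    (List.range L).foldl (pvInsStep L) cs = PySem.Chars.join ['.'] (pvGroupLoop cs []) := by
  induction L using Nat.strong_induction_on with
  | _ L ih =>
    intro cs hlen
    by_cases h4 : L < 4
    · rw [pvGroupLoop_le (by omega), PySem.Chars.join_singleton]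
      interval_cases L <;> simp [List.range_succ, pvInsStep]
    · have h3 : 3 < cs.length := by omega
      have hr : List.range L = List.range 4 ++ (List.range (L - 4)).map (4 + ·) := by
        rw [← List.range_add]; congr 1; omega
      have htl : (cs.take (L - 3)).length = L - 3 := by simp; omega
      have h04 : (List.range 4).foldl (pvInsStep L) cs
          = cs.take (L - 3) ++ '.' :: cs.drop (L - 3) := by
        simp [List.range_succ, pvInsStep]
      rw [hr, List.foldl_append, h04, List.foldl_map,
        pv_fold_append L _ _ _ (by intro j hj; rw [htl]; omega)]
      have hre : (List.range (L - 4)).foldl (fun s j => pvInsStep L s (4 + j)) (cs.take (L - 3))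
          = (List.range (L - 4)).foldl (fun s j => pvInsStep (L - 3) s (1 + j)) (cs.take (L - 3)) := by
        apply PySem.List.foldl_congr_mem
        intro acc j _
        unfold pvInsStep
        have hm : (4 + j) % 3 = (1 + j) % 3 := by omega
        have hp : L - (4 + j) = (L - 3) - (1 + j) := by omega
        rw [hm, hp]
        simp
      have hsplit : List.range (L - 3) = List.range 1 ++ (List.range (L - 4)).map (1 + ·) := by
        rw [← List.range_add]; congr 1; omega
      have hL3 : (List.range (L - 3)).foldl (pvInsStep (L - 3)) (cs.take (L - 3))
          = (List.range (L - 4)).foldl (fun s j => pvInsStep (L - 3) s (1 + j)) (cs.take (L - 3)) := by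
        rw [hsplit, List.foldl_append, List.foldl_map]
        simp [List.range_succ, pvInsStep]
      rw [hre, ← hL3, ih (L - 3) (by omega) _ htl]
      rw [pvGroupLoop_gt h3, hlen]
      rw [pvGroupLoop_acc (cs.take (L - 3)).length _ (le_refl _) [cs.drop (L - 3)],
        pv_join_append _ _ _ (pvGroupLoop_ne_nil (cs.take (L - 3)).length _ (le_refl _) _)]
      simp

theorem pv_tointstr_eq_group (n : Int) : pvTointstr n = pvGroup n := by
  unfold pvTointstr pvGroup
  exact pv_ins_eq_group _ _ rfl

-- ---- the main body ----

-- the effect of one row of A's loop on totalcortes (indices k, k+1, …)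
def pvAddInto (tc : List Int) (k : Nat) (c : Int) (p : List Int) : List Int :=
  tc.take k ++ List.zipWith (fun t x => t + x * c) (tc.drop k) p ++ tc.drop (k + p.length)

def pvCellOf (x : Int) : List Char := pvCell (if x == 0 then ['-'] else PySem.Int.toChars x)

theorem pvAddInto_length {tc : List Int} {k : Nat} {c : Int} {p : List Int}
    (h : k + p.length ≤ tc.length) : (pvAddInto tc k c p).length = tc.length := by
  simp [pvAddInto]; omega

theorem pvAddInto_set {tc : List Int} {k : Nat} {c x : Int} {xs : List Int}
    (h : k < tc.length) :
    pvAddInto (tc.set k (tc.getD k 0 + x * c)) (k + 1) c xs = pvAddInto tc k c (x :: xs) := by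
  have hgd : tc.getD k 0 = tc[k] := List.getD_eq_getElem tc 0 h
  set v : Int := tc[k] + x * c with hv
  have hset : tc.set k (tc.getD k 0 + x * c) = tc.take k ++ v :: tc.drop (k + 1) := by
    rw [List.set_eq_take_append_cons_drop, if_pos h, hgd]
  have hlk : (tc.take k).length = k := by simp; omega
  unfold pvAddInto
  rw [hset]
  have h1 : (tc.take k ++ v :: tc.drop (k + 1)).take (k + 1) = tc.take k ++ [v] := by
    rw [show k + 1 = (tc.take k).length + 1 from by rw [hlk], List.take_append]
    simp
  have h2 : (tc.take k ++ v :: tc.drop (k + 1)).drop (k + 1) = tc.drop (k + 1) := by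
    rw [show k + 1 = (tc.take k).length + 1 from by rw [hlk], List.drop_append]
    simp
  have h3 : (tc.take k ++ v :: tc.drop (k + 1)).drop (k + 1 + xs.length)
      = tc.drop (k + (x :: xs).length) := by
    rw [List.drop_append]
    have e1 : (tc.take k).drop (k + 1 + xs.length) = [] := by
      apply List.drop_eq_nil_of_le
      rw [hlk]; omega
    have e2 : k + 1 + xs.length - (tc.take k).length = xs.length + 1 := by rw [hlk]; omega
    rw [e1, e2, List.drop_succ_cons, List.drop_drop]
    simp
    congr 1
    omega
  rw [h1, h2, h3]
  have h4 : tc.drop k = tc[k] :: tc.drop (k + 1) := List.drop_eq_getElem_cons h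
  rw [h4]
  simp only [List.zipWith_cons_cons]
  simp [List.append_assoc, hv]

theorem pv_inner (c : Int) (p : List Int) : ∀ (k : Nat) (s : List Char) (tc : List Int),
    k + p.length ≤ tc.length →
    (PySem.List.enumerate p (k : Int)).foldl
      (fun st2 inx =>
        (st2.1 ++ pvLjust6 (if inx.2 == 0 then ['-'] else PySem.Int.toChars inx.2) ++ ['\t'],
         st2.2.set inx.1.toNat (st2.2.getD inx.1.toNat 0 + inx.2 * c)))
      (s, tc)
    = (s ++ (p.map (fun x => pvCellOf x)).flatten, pvAddInto tc k c p) := by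
  induction p with
  | nil =>
    intro k s tc _
    simp [PySem.List.enumerate_nil, pvAddInto, List.take_append_drop]
  | cons x xs ih =>
    intro k s tc hlen
    rw [PySem.List.enumerate_cons, List.foldl_cons]
    have hk : ((k : Int)).toNat = k := Int.toNat_natCast k
    have hcast : (k : Int) + 1 = ((k + 1 : Nat) : Int) := by push_cast; ring
    simp only [hk, hcast]
    rw [ih (k + 1) _ _ (by simp at hlen ⊢; omega)]
    rw [pvAddInto_set (by simp at hlen; omega)]
    simp [pvCellOf, pvCell, pvLjust6, List.append_assoc]

theorem pv_inner0 (c : Int) (p : List Int) (s : List Char) (tc : List Int)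
    (h : p.length ≤ tc.length) :
    (PySem.List.enumerate p 0).foldl
      (fun st2 inx =>
        (st2.1 ++ pvLjust6 (if inx.2 == 0 then ['-'] else PySem.Int.toChars inx.2) ++ ['\t'],
         st2.2.set inx.1.toNat (st2.2.getD inx.1.toNat 0 + inx.2 * c)))
      (s, tc)
    = (s ++ (p.map (fun x => pvCellOf x)).flatten, pvAddInto tc 0 c p) :=
  pv_inner c p 0 s tc (by omega)

-- the rendering of one pattern row
def pvRow (cuts : List Int) (cp : Int × List Int) : List Char :=
  '\t' :: PySem.Int.toChars cp.1 ++ ['\t']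
    ++ (cp.2.map (fun x => pvCellOf x)).flatten
    ++ '\t' :: PySem.Int.toChars ((List.zipWith (· * ·) cp.2 cuts).sum) ++ ['\n']

theorem pv_outer (cuts : List Int) (opt : List (Int × List Int)) :
    ∀ (s : List Char) (tc : List Int), tc.length = cuts.length →
    (∀ cp ∈ opt, cp.2.length ≤ cuts.length) →
    opt.foldl
      (fun (st : List Char × List Int) cp =>
        let s := st.1 ++ ['\t'] ++ PySem.Int.toChars cp.1 ++ ['\t']
        let st2 := (PySem.List.enumerate cp.2 0).foldl
          (fun (st2 : List Char × List Int) inx =>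
            (st2.1 ++ pvLjust6 (if inx.2 == 0 then ['-'] else PySem.Int.toChars inx.2) ++ ['\t'],
             st2.2.set inx.1.toNat (st2.2.getD inx.1.toNat 0 + inx.2 * cp.1)))
          (s, st.2)
        (st2.1 ++ ['\t'] ++ PySem.Int.toChars ((List.zipWith (· * ·) cp.2 cuts).sum) ++ ['\n'], st2.2))
      (s, tc)
    = (s ++ (opt.map (fun cp => pvRow cuts cp)).flatten,
       opt.foldl (fun tc cp => pvAddInto tc 0 cp.1 cp.2) tc) := by
  induction opt with
  | nil => intro s tc _ _; simp
  | cons cp opt ih =>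
    intro s tc hlen hp
    simp only [List.foldl_cons]
    rw [pv_inner0 cp.1 cp.2 _ _ (by rw [hlen]; exact hp cp (by simp))]
    rw [ih _ _ (by rw [pvAddInto_length (by rw [hlen]; simpa using hp cp (by simp))]; exact hlen)
      (fun q hq => hp q (by simp [hq]))]
    simp [pvRow, List.append_assoc]

theorem pv_cells_fold (xs : List Int) (s : List Char) :
    xs.foldl (fun s corte => s ++ pvLjust6 (PySem.Int.toChars corte) ++ ['\t']) s
      = s ++ (xs.map (fun c => pvCell (PySem.Int.toChars c))).flatten := by
  induction xs generalizing s with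
  | nil => simp
  | cons x xs _ => simp [pvCell, pvLjust6, List.append_assoc]

theorem pv_main (nombre : String) (optimum : List (Int × List Int)) (cuts : List Int) (precio : Int)
    (hpre : ∀ cp ∈ optimum, cp.2.length ≤ cuts.length) :
    string_results nombre optimum cuts precio = string_results_alt nombre optimum cuts precio := by
  simp only [string_results, string_results_alt]
  rw [pv_cells_fold, pv_outer cuts optimum _ _ (by simp) hpre, pv_cells_fold,
    pv_tointstr_eq_group]
  rw [show (fun (tc : List Int) (cp : Int × List Int) => pvAddInto tc 0 cp.1 cp.2)
      = (fun (tc : List Int) (cp : Int × List Int) =>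
          List.zipWith (fun t x => t + x * cp.1) tc cp.2 ++ tc.drop cp.2.length) from
    funext fun tc => funext fun cp => by simp [pvAddInto]]
  rw [show (cuts.map (fun _ => (0 : Int))) = PySem.List.pyRepeat [(0 : Int)] (PySem.List.len cuts) from by
    simp [PySem.List.pyRepeat_singleton, List.map_const']]
  congr 1
  simp [pvRow, pvCellOf, List.append_assoc]

-- ===== VERDICT (by name: the statement is the Claim_ definition above) =====
theorem string_results_spec : Claim_equal_string_results := by
  intro nombre optimum cuts precio _hdom hpre
  exact pv_main nombre optimum cuts precio hpre
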